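-- pv_equiv track=rewrite | github.com/Echoslayer/AutoResearch | outline_agent/services/outline_agent_service.py | _extract_title_sections_descriptions
-- ===== SOURCE A (Python) =====
-- def _extract_title_sections_descriptions(outline):
--     lines = outline.split('\n')
--     title = lines[0].strip()
--     sections = []
--     descriptions = []
--     current_section = None
--     current_description = []
--
--     for line in lines[1:]:
--         if line.startswith('Section'):
--             if current_section:
--                 sections.append(current_section)
--                 descriptions.append(' '.join(current_description))
--             current_section = line.split(':', 1)[1].strip()
--             current_description = []
--         elif line.strip():
--             current_description.append(line.strip())
--
--     if current_section:
--         sections.append(current_section)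
--         descriptions.append(' '.join(current_description))
--
--     return title, sections, descriptions
-- ===== SOURCE B (Python) =====
-- def _extract_title_sections_descriptions(outline):
--     lines = outline.split('\n')
--     rest = lines[1:]
--     sections = []
--     descriptions = []
--     i = 0
--     n = len(rest)
--     while i < n:
--         if not rest[i].startswith('Section'):
--             i += 1
--             continue
--         name = rest[i].split(':', 1)[1].strip()
--         i += 1
--         body = []
--         while i < n and not rest[i].startswith('Section'):
--             body.append(rest[i])
--             i += 1
--         if name:
--             sections.append(name)
--             descriptions.append(' '.join(l.strip() for l in body if l.strip()))
--     return lines[0].strip(), sections, descriptions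
-- ===== Notes on version B (the rewrite author's own statement) =====
-- stated objective: alternative
-- what changed: A's single stateful pass (current_section/current_description accumulators with a trailing flush) is replaced by a block-partition parser that skips to each 'Section' header and consumes its body up to the next header; Pre_ excludes only inputs where A raises IndexError (a post-title header line without a colon), on which B raises too.
import Mathlib
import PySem

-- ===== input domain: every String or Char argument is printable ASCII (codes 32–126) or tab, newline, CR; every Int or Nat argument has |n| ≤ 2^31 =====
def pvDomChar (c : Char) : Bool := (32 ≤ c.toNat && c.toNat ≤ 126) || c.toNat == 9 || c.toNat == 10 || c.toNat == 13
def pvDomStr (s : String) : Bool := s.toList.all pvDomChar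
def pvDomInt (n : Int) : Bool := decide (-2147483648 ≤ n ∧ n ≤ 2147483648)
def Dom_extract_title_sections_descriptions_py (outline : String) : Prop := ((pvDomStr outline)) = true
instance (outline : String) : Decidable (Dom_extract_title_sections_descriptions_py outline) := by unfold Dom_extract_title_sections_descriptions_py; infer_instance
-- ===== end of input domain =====

-- B replaces A's single stateful accumulator loop by a block-partition parser (skip to each
-- 'Section' header, take the body up to the next header); objective: alternative decomposition.

-- ===== PORT A =====
-- Python truthiness of `current_section` (None or str): falsy iff None or "".
def pvTruthyOpt (o : Option String) : Bool :=
  match o with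
  | none => false
  | some s => s != ""

-- name = line.split(':', 1)[1].strip()  (IndexError when ':' absent is excluded by Pre_; getD "" there)
def pvHeaderName (line : String) : String :=
  PySem.Str.strip ((PySem.List.pyGet? ((PySem.Str.splitMax? line ":" 1).getD []) 1).getD "")

-- the for-loop over lines[1:] with state (sections, descriptions, current_section, current_description),
-- including the trailing flush at the end of the loop
def pvALoop : List String → List String → List String → Option String → List String →
    List String × List String
  | [], secs, descs, cur, curdesc =>
    if pvTruthyOpt cur then
      (secs ++ [cur.getD ""], descs ++ [PySem.Str.join " " curdesc])
    else (secs, descs)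
  | line :: rest, secs, descs, cur, curdesc =>
    if PySem.Str.startswith line "Section" then
      if pvTruthyOpt cur then
        pvALoop rest (secs ++ [cur.getD ""]) (descs ++ [PySem.Str.join " " curdesc])
          (some (pvHeaderName line)) []
      else
        pvALoop rest secs descs (some (pvHeaderName line)) []
    else if PySem.Str.strip line != "" then
      pvALoop rest secs descs cur (curdesc ++ [PySem.Str.strip line])
    else
      pvALoop rest secs descs cur curdesc

def extract_title_sections_descriptions_py (outline : String) : String × List String × List String :=
  let lines := (PySem.Str.split? outline "\n").getD []
  let title := PySem.Str.strip ((PySem.List.pyGet? lines 0).getD "")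
  let (secs, descs) := pvALoop (lines.drop 1) [] [] none []
  (title, secs, descs)

-- ===== PORT B =====
def pvIsHeader (l : String) : Bool := PySem.Str.startswith l "Section"

-- ' '.join(l.strip() for l in body if l.strip())
def pvCleanBody (body : List String) : List String :=
  body.filterMap (fun l => if PySem.Str.strip l = "" then none else some (PySem.Str.strip l))

-- the two while loops of Source B: skip a non-header line, otherwise consume one block
-- (header + body up to the next header) and continue after it
def pvBBlocks : List String → List String × List String
  | [] => ([], [])
  | l :: rest =>
    if pvIsHeader l then
      let body := rest.takeWhile (fun x => !pvIsHeader x)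
      let name := pvHeaderName l
      let (secs, descs) := pvBBlocks (rest.dropWhile (fun x => !pvIsHeader x))
      if name ≠ "" then
        (name :: secs, PySem.Str.join " " (pvCleanBody body) :: descs)
      else (secs, descs)
    else pvBBlocks rest
termination_by xs => xs.length
decreasing_by
  · have := List.length_dropWhile_le (fun x => !pvIsHeader x) rest
    simp; omega
  · simp

def extract_title_sections_descriptions_py_alt (outline : String) : String × List String × List String :=
  let lines := (PySem.Str.split? outline "\n").getD []
  let (secs, descs) := pvBBlocks (lines.drop 1)
  (PySem.Str.strip ((PySem.List.pyGet? lines 0).getD ""), secs, descs)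

-- ===== PRECONDITION & SPEC =====
-- Pre_ excludes exactly the inputs where A raises IndexError: a post-title line that starts
-- with 'Section' but contains no ':' (line.split(':', 1)[1] has no element 1 there).
def Pre_extract_title_sections_descriptions_py (outline : String) : Prop :=
  ∀ l ∈ ((PySem.Str.split? outline "\n").getD []).drop 1,
    PySem.Str.startswith l "Section" = true → PySem.Str.isIn ":" l = true
instance (outline : String) : Decidable (Pre_extract_title_sections_descriptions_py outline) := by
  unfold Pre_extract_title_sections_descriptions_py; infer_instance

def pvWitness_extract_title_sections_descriptions_py : String :=
  "My Title\nSection 1: Intro\nsome text\n\nSection 2: Body\nmore"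

def Spec_extract_title_sections_descriptions_py (outline : String)
    (out : String × List String × List String) : Prop :=
  out = extract_title_sections_descriptions_py_alt outline
instance (outline : String) (out : String × List String × List String) :
    Decidable (Spec_extract_title_sections_descriptions_py outline out) := by
  unfold Spec_extract_title_sections_descriptions_py; infer_instance

-- ===== CLAIM (what is proved, stated in full; the proofs are below) =====
def Claim_equal_extract_title_sections_descriptions_py : Prop :=
  ∀ (outline : String), Dom_extract_title_sections_descriptions_py outline →
    Pre_extract_title_sections_descriptions_py outline →
    Spec_extract_title_sections_descriptions_py outline (extract_title_sections_descriptions_py outline)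

-- ===== LEMMAS AND PROOFS =====

theorem pvWitness_ok :
    Dom_extract_title_sections_descriptions_py pvWitness_extract_title_sections_descriptions_py ∧
    Pre_extract_title_sections_descriptions_py pvWitness_extract_title_sections_descriptions_py := by
  constructor <;> decide

theorem pvBBlocks_cons_header (l : String) (rest : List String) (hl : pvIsHeader l = true) :
    pvBBlocks (l :: rest) =
      (let body := rest.takeWhile (fun x => !pvIsHeader x)
       let name := pvHeaderName l
       let (secs, descs) := pvBBlocks (rest.dropWhile (fun x => !pvIsHeader x))
       if name ≠ "" then
         (name :: secs, PySem.Str.join " " (pvCleanBody body) :: descs)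
       else (secs, descs)) := by
  rw [pvBBlocks]
  simp [hl]

theorem pvBBlocks_cons_nonheader (l : String) (rest : List String) (hl : pvIsHeader l = false) :
    pvBBlocks (l :: rest) = pvBBlocks rest := by
  rw [pvBBlocks]
  simp [hl]

theorem pvBBlocks_dropWhile (rest : List String) :
    pvBBlocks (rest.dropWhile (fun l => !pvIsHeader l)) = pvBBlocks rest := by
  induction rest with
  | nil => rfl
  | cons x t ih =>
    by_cases hx : pvIsHeader x = true
    · simp [hx]
    · have hx' : pvIsHeader x = false := eq_false_of_ne_true hx
      simp [hx', ih, pvBBlocks_cons_nonheader x t hx']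

-- the loop invariant: A's accumulator loop from any state equals B's block partition of the
-- remaining lines, with the pending section flushed against the leading non-header lines
theorem pvALoop_eq (rest : List String) :
    ∀ (secs descs : List String) (cur : Option String) (curdesc : List String),
    pvALoop rest secs descs cur curdesc =
      (let (s, d) := pvBBlocks rest
       if pvTruthyOpt cur then
         (secs ++ cur.getD "" :: s,
          descs ++ PySem.Str.join " "
            (curdesc ++ pvCleanBody (rest.takeWhile (fun l => !pvIsHeader l))) :: d)
       else (secs ++ s, descs ++ d)) := by
  induction rest with
  | nil =>
    intro secs descs cur curdesc
    rw [pvBBlocks]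
    by_cases hc : pvTruthyOpt cur = true <;>
      simp [pvALoop, hc, pvCleanBody]
  | cons line rest ih =>
    intro secs descs cur curdesc
    by_cases hh : PySem.Str.startswith line "Section" = true
    · have hhd : pvIsHeader line = true := hh
      rw [pvBBlocks_cons_header line rest hhd]
      by_cases hc : pvTruthyOpt cur = true
      · simp only [pvALoop, hh, if_pos hc, ih]
        cases hb : pvBBlocks rest with
        | mk s d =>
          simp only [List.takeWhile_cons, hhd]
          by_cases hn : pvHeaderName line ≠ "" <;>
            simp [hn, pvTruthyOpt, pvCleanBody, pvBBlocks_dropWhile, hb]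
      · simp only [pvALoop, hh, if_neg hc, ih]
        cases hb : pvBBlocks rest with
        | mk s d =>
          by_cases hn : pvHeaderName line ≠ "" <;>
            simp [hn, pvTruthyOpt, pvCleanBody, pvBBlocks_dropWhile, hb]
    · have hh' : PySem.Str.startswith line "Section" = false := eq_false_of_ne_true hh
      have hhd : pvIsHeader line = false := hh'
      rw [pvBBlocks_cons_nonheader line rest hhd]
      by_cases hs : PySem.Str.strip line = ""
      · have hsb : (PySem.Str.strip line != "") = false := by simp [hs]
        simp only [pvALoop, hh', Bool.false_eq_true, if_false, hsb, ih]
        by_cases hc : pvTruthyOpt cur = true <;>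
          simp [hc, hhd, pvCleanBody, hs]
      · have hsb : (PySem.Str.strip line != "") = true := by simp [hs]
        simp only [pvALoop, hh', Bool.false_eq_true, if_false, hsb, if_true, ih]
        by_cases hc : pvTruthyOpt cur = true <;>
          simp [hc, hhd, pvCleanBody, hs]

-- ===== VERDICT (by name: the statement is the Claim_ definition above) =====
theorem extract_title_sections_descriptions_py_spec :
    Claim_equal_extract_title_sections_descriptions_py := by
  intro outline _ _
  unfold Spec_extract_title_sections_descriptions_py
  unfold extract_title_sections_descriptions_py extract_title_sections_descriptions_py_alt
  simp only [pvALoop_eq]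
  cases hb : pvBBlocks (((PySem.Str.split? outline "\n").getD []).drop 1) with
  | mk s d => simp [pvTruthyOpt]
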